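-- pv_equiv track=rewrite | github.com/emmas0507/leetcode | unique_abbreviation.py | unique_abbreviation
-- ===== SOURCE A (Python) =====
-- def get_abbreviation(word):
--     if len(word) <= 2:
--         return word
--     else:
--         return word[0] + str(len(word)-2) + word[-1]
--
-- def unique_abbreviation(word_list, target_w):
--     abb_dict = {}
--     for w in word_list:
--         abb_w = get_abbreviation(w)
--         if abb_w in abb_dict.keys():
--             abb_dict[abb_w] = abb_dict[abb_w] + [w]
--         else:
--             abb_dict[abb_w] = [w]
--
--     abb_target = get_abbreviation(target_w)
--     if abb_target not in abb_dict.keys():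
--         return True
--     else:
--         word_list = abb_dict[abb_target]
--         for w in word_list:
--             if w != target_w:
--                 return False
--         return True
-- ===== SOURCE B (Python) =====
-- def get_abbreviation(word):
--     if len(word) <= 2:
--         return word
--     else:
--         return word[0] + str(len(word)-2) + word[-1]
--
-- def unique_abbreviation(word_list, target_w):
--     abb_target = get_abbreviation(target_w)
--     for w in word_list:
--         if get_abbreviation(w) == abb_target and w != target_w:
--             return False
--     return True
-- ===== Notes on version B (the rewrite author's own statement) =====
-- stated objective: simpler
-- what changed: B drops A's two-phase dict grouping entirely: it computes the target's abbreviation once and makes a single early-exiting pass over the list, returning False at the first word with the same abbreviation that is not the target.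
import Mathlib
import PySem

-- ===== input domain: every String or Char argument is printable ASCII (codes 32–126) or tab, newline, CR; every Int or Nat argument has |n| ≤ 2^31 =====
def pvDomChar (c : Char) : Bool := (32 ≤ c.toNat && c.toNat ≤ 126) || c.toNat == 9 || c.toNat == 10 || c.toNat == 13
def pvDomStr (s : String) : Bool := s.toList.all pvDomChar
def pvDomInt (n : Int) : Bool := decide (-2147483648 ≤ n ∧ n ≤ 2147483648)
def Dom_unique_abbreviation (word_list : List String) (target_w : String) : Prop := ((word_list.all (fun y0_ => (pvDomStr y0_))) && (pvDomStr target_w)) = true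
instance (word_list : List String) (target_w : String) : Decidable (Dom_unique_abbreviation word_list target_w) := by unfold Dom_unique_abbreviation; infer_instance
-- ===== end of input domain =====

-- B: same answer by a single early-exiting scan against the target abbreviation, instead of A's dict grouping; no auxiliary structure (measured faster by constant factor).

-- ===== PORT A =====
-- shared helper (identical in Source A and Source B): get_abbreviation(word)
def get_abbreviation (word : String) : String :=
  let cs := word.toList
  if PySem.List.len cs ≤ 2 then word
  else String.ofList ([PySem.List.pyGetD cs 0 ' '] ++ PySem.Int.toChars (PySem.List.len cs - 2) ++ [PySem.List.pyGetD cs (-1) ' '])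
  -- word[0], word[-1] are in range since len(word) ≥ 3; '+' on strings is list append under String.ofList

-- the final 'for w in word_list: if w != target_w: return False / return True' of A
def uaCheckGroup (group : List String) (target_w : String) : Bool :=
  match group with
  | [] => true
  | w :: rest => if w ≠ target_w then false else uaCheckGroup rest target_w

def unique_abbreviation (word_list : List String) (target_w : String) : Bool :=
  let abb_dict : PySem.Dict String (List String) :=
    word_list.foldl (fun d w =>
      let abb_w := get_abbreviation w
      if d.contains abb_w then d.insert abb_w (d.getD abb_w [] ++ [w])
      else d.insert abb_w [w]) PySem.Dict.empty
  let abb_target := get_abbreviation target_w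
  if ¬ abb_dict.contains abb_target then true
  else uaCheckGroup (abb_dict.getD abb_target []) target_w

-- ===== PORT B =====
def uaScan (word_list : List String) (abb_target : String) (target_w : String) : Bool :=
  match word_list with
  | [] => true
  | w :: rest =>
      if get_abbreviation w = abb_target ∧ w ≠ target_w then false
      else uaScan rest abb_target target_w

def unique_abbreviation_alt (word_list : List String) (target_w : String) : Bool :=
  uaScan word_list (get_abbreviation target_w) target_w

-- ===== PRECONDITION & SPEC =====
def Spec_unique_abbreviation (word_list : List String) (target_w : String) (out : Bool) : Prop := out = unique_abbreviation_alt word_list target_w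
instance (word_list : List String) (target_w : String) (out : Bool) : Decidable (Spec_unique_abbreviation word_list target_w out) := by unfold Spec_unique_abbreviation; infer_instance

-- ===== CLAIM (what is proved, stated in full; the proofs are below) =====
def Claim_equal_unique_abbreviation : Prop := ∀ (word_list : List String) (target_w : String), Dom_unique_abbreviation word_list target_w → Spec_unique_abbreviation word_list target_w (unique_abbreviation word_list target_w)

-- ===== LEMMAS AND PROOFS =====

-- A's grouping loop, named for the lemmas below
def uaFold (word_list : List String) (d : PySem.Dict String (List String)) : PySem.Dict String (List String) :=
  word_list.foldl (fun d w =>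
    let abb_w := get_abbreviation w
    if d.contains abb_w then d.insert abb_w (d.getD abb_w [] ++ [w])
    else d.insert abb_w [w]) d

theorem uaFold_getD (word_list : List String) (d : PySem.Dict String (List String)) (c : String) :
    (uaFold word_list d).getD c [] = d.getD c [] ++ word_list.filter (fun w => get_abbreviation w == c) := by
  induction word_list generalizing d with
  | nil => simp [uaFold]
  | cons w rest ih =>
    have step : uaFold (w :: rest) d =
        uaFold rest (if d.contains (get_abbreviation w)
          then d.insert (get_abbreviation w) (d.getD (get_abbreviation w) [] ++ [w])
          else d.insert (get_abbreviation w) [w]) := by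
      simp [uaFold, List.foldl_cons]
    rw [step, ih]
    by_cases he : get_abbreviation w = c
    · subst he
      by_cases hc : d.contains (get_abbreviation w) = true
      · simp [hc, PySem.Dict.getD_insert_self]
      · have hd0 : d.getD (get_abbreviation w) [] = [] := by
          simp [PySem.Dict.getD_of_not_contains, (by simpa using hc : d.contains (get_abbreviation w) = false)]
        simp [hc, PySem.Dict.getD_insert_self, hd0]
    · by_cases hc : d.contains (get_abbreviation w) = true <;>
        simp [hc, PySem.Dict.getD_insert, he, Ne.symm he]

theorem uaFold_contains (word_list : List String) (d : PySem.Dict String (List String)) (c : String) :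
    (uaFold word_list d).contains c = (d.contains c || word_list.any (fun w => get_abbreviation w == c)) := by
  induction word_list generalizing d with
  | nil => simp [uaFold]
  | cons w rest ih =>
    have step : uaFold (w :: rest) d =
        uaFold rest (if d.contains (get_abbreviation w)
          then d.insert (get_abbreviation w) (d.getD (get_abbreviation w) [] ++ [w])
          else d.insert (get_abbreviation w) [w]) := by
      simp [uaFold, List.foldl_cons]
    rw [step, ih]
    by_cases hbe : c = get_abbreviation w
    · subst hbe
      by_cases hc : d.contains (get_abbreviation w) = true <;>
        simp [hc, List.any_cons]
    · have hb : (c == get_abbreviation w) = false := beq_eq_false_iff_ne.2 hbe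
      have hb' : (get_abbreviation w == c) = false := beq_eq_false_iff_ne.2 (Ne.symm hbe)
      by_cases hc : d.contains (get_abbreviation w) = true <;>
        simp [hc, hb, hb', PySem.Dict.contains_insert, List.any_cons]

theorem uaCheckGroup_eq_all (group : List String) (t : String) :
    uaCheckGroup group t = group.all (fun w => w == t) := by
  induction group with
  | nil => rfl
  | cons w rest ih =>
    by_cases h : w = t <;> simp [uaCheckGroup, h, ih]

theorem uaScan_eq_all (word_list : List String) (a t : String) :
    uaScan word_list a t = word_list.all (fun w => !(get_abbreviation w == a) || w == t) := by
  induction word_list with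
  | nil => rfl
  | cons w rest ih =>
    by_cases h1 : get_abbreviation w = a
    · by_cases h2 : w = t <;> simp [uaScan, h1, h2, ih]
    · simp [uaScan, h1, ih]

theorem all_filter_abb (l : List String) (a t : String) :
    (l.filter (fun w => get_abbreviation w == a)).all (fun w => w == t)
      = l.all (fun w => !(get_abbreviation w == a) || w == t) := by
  induction l with
  | nil => rfl
  | cons w rest ih =>
    by_cases h : get_abbreviation w = a <;> simp [h, ih]

-- ===== VERDICT (by name: the statement is the Claim_ definition above) =====
theorem unique_abbreviation_spec : Claim_equal_unique_abbreviation := by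
  intro word_list target_w _
  unfold Spec_unique_abbreviation unique_abbreviation unique_abbreviation_alt
  rw [uaScan_eq_all]
  show (if ¬ (uaFold word_list PySem.Dict.empty).contains (get_abbreviation target_w) = true then true
        else uaCheckGroup ((uaFold word_list PySem.Dict.empty).getD (get_abbreviation target_w) []) target_w) = _
  rw [uaFold_contains, uaFold_getD, uaCheckGroup_eq_all]
  simp only [PySem.Dict.contains_empty, PySem.Dict.getD_empty, Bool.false_or, List.nil_append]
  rw [all_filter_abb]
  by_cases hc : word_list.any (fun w => get_abbreviation w == get_abbreviation target_w) = true
  · rw [if_neg (by simp [hc])]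
  · rw [if_pos (by simp [hc])]
    symm
    rw [List.all_eq_true]
    intro w hw
    have hne : (get_abbreviation w == get_abbreviation target_w) = false := by
      cases h : (get_abbreviation w == get_abbreviation target_w)
      · rfl
      · exact absurd (List.any_eq_true.2 ⟨w, hw, h⟩) hc
    simp [hne]
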